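-- pv_equiv track=rewrite | github.com/mlearnprojects/daily-programmer | 336_easy/python_solution_3_with_ext_1/main.py | cannibal
-- ===== SOURCE A (Python) =====
-- def sort_and_remove_ready_cannibals(border, numbers):
--     sorted_numbers = sorted(numbers, reverse=True)
--     ready_numbers = [num for num in sorted_numbers if num >= border]
--     del sorted_numbers[:len(ready_numbers)]
--
--     return sorted_numbers, ready_numbers
--
-- def remove_clones(number, arr):
--     return [x for x in arr if x != number]
--
-- def cannibal(numbers, borders):
--     """
--     >>> cannibal([3, 3, 3, 2, 2, 2, 1, 1, 1], [4])
--     [4]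
--     >>> cannibal([4, 4, 4, 4, 1, 1, 1, 1, 1], [5])
--     [4]
--     >>> cannibal([21, 9, 5, 8, 10, 1, 3], [10, 15])
--     [4, 2]
--     >>> cannibal([1, 2, 3, 4, 5], [5])
--     [2]
--     >>> cannibal([15, 1, 5, 20, 2, 8, 6, 6, 8, 7, 7, 8], [6, 8])
--     [10, 8]
--     >>> cannibal([66, 70, 80, 120, 30, 55, 75, 44, 44, 55, 66, 70, 70, 80, 80, 22, 80], [66, 67, 68, 70, 73, 75, 77])
--     [11, 11, 11, 10, 8, 7, 7]
--     >>> cannibal([10, 9, 9, 1, 1, 1, 1, 1, 1, 1], [12])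
--     [2]
--     >>> cannibal([4, 4, 4, 4, 4, 4, 4], [5])
--     [0]
--     >>> cannibal([1, 5, 4, 4, 4], [6])
--     [2]
--     >>> cannibal([1, 1, 4, 4, 4, 5, 4, 4, 4], [6])
--     [3]
--     >>> cannibal([120, 50, 10, 10, 9, 9, 9, 9, 9, 9, 9, 9, 9, 9, 1, 1, 1, 1], [11])
--     [8]
--     >>> cannibal([5, 4, 4, 4, 4, 3, 3, 3, 2, 2, 2, 2, 2, 1, 1], [6])
--     [5]
--     """
--
--     if not numbers or not borders:
--         raise Exception('numbers and borders are required')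
--
--     cannibals_quantities = []
--     for border in borders:
--         sorted_numbers, ready_cannibals = sort_and_remove_ready_cannibals(border, numbers)
--
--         i = 1
--         number_of_cannibals = 0
--         cannibals, victims = sorted_numbers[:1], sorted_numbers[1:]
--
--         while victims:
--
--             smallest_cannibal = cannibals[-1]
--             smallest_cannibal_quantity = cannibals.count(smallest_cannibal)
--
--             rest_victims = remove_clones(smallest_cannibal, victims)
--             if len(rest_victims) < smallest_cannibal_quantity:
--                 break
--
--             combined_needed_victims = 0
--             for cannibal in cannibals:
--                 cannibal_needed_victims = border - cannibal
--                 combined_needed_victims += cannibal_needed_victims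
--
--             if combined_needed_victims <= len(victims):
--                 number_of_cannibals = len(cannibals)
--                 i += 1
--                 cannibals, victims = sorted_numbers[:i], sorted_numbers[i:]
--             else:
--                 break
--
--         cannibals_quantities.append(number_of_cannibals + len(ready_cannibals))
--
--     return cannibals_quantities
-- ===== SOURCE B (Python) =====
-- def cannibal(numbers, borders):
--     s = sorted(numbers, reverse=True)
--     result = []
--     for border in borders:
--         t = [x for x in s if x < border]
--         ready = len(s) - len(t)
--         counts = {}
--         for x in t:
--             counts[x] = counts.get(x, 0) + 1
--         m = len(t)
--         ans = 0
--         j = 1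
--         need = border - t[0] if t else 0
--         while j < m:
--             v = t[j - 1]
--             if m - j < counts.get(v, 0):
--                 break
--             if need <= m - j:
--                 ans = j
--                 need += border - t[j]
--                 j += 1
--             else:
--                 break
--         result.append(ans + ready)
--     return result
-- ===== Notes on version B (the rewrite author's own statement) =====
-- stated objective: faster
-- what changed: B sorts once, splits off the ready cannibals with a single filter, precomputes a frequency dictionary, and runs the per-border elimination as a single incremental scan that maintains the needed-victims running sum, instead of A's per-step list count/remove/rescan passes.
import Mathlib
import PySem

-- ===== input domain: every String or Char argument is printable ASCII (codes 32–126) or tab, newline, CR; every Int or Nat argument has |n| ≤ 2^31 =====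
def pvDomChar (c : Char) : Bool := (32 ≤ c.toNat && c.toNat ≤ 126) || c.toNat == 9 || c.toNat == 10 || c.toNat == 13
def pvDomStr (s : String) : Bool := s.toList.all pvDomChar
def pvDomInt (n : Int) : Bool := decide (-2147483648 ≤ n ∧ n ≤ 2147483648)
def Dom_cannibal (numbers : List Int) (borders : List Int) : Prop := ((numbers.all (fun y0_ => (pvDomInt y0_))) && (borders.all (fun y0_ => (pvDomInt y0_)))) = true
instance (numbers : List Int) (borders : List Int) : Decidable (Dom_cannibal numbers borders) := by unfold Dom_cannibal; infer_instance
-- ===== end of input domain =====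

-- B sorts once, splits off ready cannibals with one filter, precomputes a frequency dict and keeps a running
-- needed-victims sum, replacing A's per-step count/remove/rescan passes (measurably faster on large inputs).

-- ===== PORT A =====
def sortAndRemoveReadyCannibals (border : Int) (numbers : List Int) : List Int × List Int :=
  let sorted_numbers := PySem.List.sorted numbers (fun x => x) true
  let ready_numbers := sorted_numbers.filter (fun num => decide (border ≤ num))
  (sorted_numbers.drop ready_numbers.length, ready_numbers)

def removeClones (number : Int) (arr : List Int) : List Int :=
  arr.filter (fun x => decide (x ≠ number))

def cannibalLoopA (border : Int) (sorted_numbers : List Int) :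
    Nat → Nat → Int → Int
  | 0, _, noc => noc      -- fuel; never reached: initial fuel bounds the iteration count
  | fuel + 1, i, noc =>
    let cannibals := sorted_numbers.take i
    let victims := sorted_numbers.drop i
    if victims = [] then noc
    else
      -- cannibals[-1]: cannibals is nonempty on every reached call (i ≥ 1), so getD 0 is never used
      let smallest := (PySem.List.pyGet? cannibals (-1)).getD 0
      let q := PySem.List.count cannibals smallest
      let rest := removeClones smallest victims
      if rest.length < q then noc
      else
        let combined := cannibals.foldl (fun acc c => acc + (border - c)) 0
        if combined ≤ (victims.length : Int) then
          cannibalLoopA border sorted_numbers fuel (i + 1) (cannibals.length : Int)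
        else noc

-- the Python guard 'if not numbers or not borders: raise' is excluded by Pre_cannibal below
def cannibal (numbers : List Int) (borders : List Int) : List Int :=
  borders.foldl (fun acc border =>
    let p := sortAndRemoveReadyCannibals border numbers
    acc ++ [cannibalLoopA border p.1 p.1.length 1 0 + (p.2.length : Int)]) []

-- ===== PORT B =====
def cannibalLoopB (border : Int) (t : List Int) (counts : PySem.Dict Int Int) (m : Nat) :
    Nat → Nat → Int → Int → Int
  | 0, _, _, ans => ans   -- fuel; never reached: initial fuel bounds the iteration count
  | fuel + 1, j, need, ans =>
    if j < m then
      -- t[j-1]: 1 ≤ j < m on every call, so in range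
      let v := PySem.List.pyGetD t ((j : Int) - 1) 0
      if (m : Int) - (j : Int) < counts.getD v 0 then ans
      else if need ≤ (m : Int) - (j : Int) then
        cannibalLoopB border t counts m fuel (j + 1)
          (need + (border - PySem.List.pyGetD t (j : Int) 0)) (j : Int)
      else ans
    else ans

def cannibal_alt (numbers : List Int) (borders : List Int) : List Int :=
  let s := PySem.List.sorted numbers (fun x => x) true
  borders.foldl (fun acc border =>
    let t := s.filter (fun x => decide (x < border))
    let ready := s.length - t.length
    let counts := t.foldl (fun d x => d.insert x (d.getD x 0 + 1)) PySem.Dict.empty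
    let m := t.length
    let need := match t with | [] => (0 : Int) | x :: _ => border - x
    acc ++ [cannibalLoopB border t counts m t.length 1 need 0 + (ready : Int)]) []

-- ===== PRECONDITION & SPEC =====
-- Pre_ excludes exactly the inputs on which Python A raises its explicit Exception: empty numbers or empty borders.
def Pre_cannibal (numbers : List Int) (borders : List Int) : Prop :=
  numbers ≠ [] ∧ borders ≠ []
instance (numbers : List Int) (borders : List Int) : Decidable (Pre_cannibal numbers borders) := by
  unfold Pre_cannibal; infer_instance

def pvWitness_cannibal : List Int × List Int := ([3, 3, 3, 2, 2, 2, 1, 1, 1], [4])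

def Spec_cannibal (numbers : List Int) (borders : List Int) (out : List Int) : Prop :=
  out = cannibal_alt numbers borders
instance (numbers : List Int) (borders : List Int) (out : List Int) : Decidable (Spec_cannibal numbers borders out) := by
  unfold Spec_cannibal; infer_instance

-- ===== CLAIM (what is proved, stated in full; the proofs are below) =====
def Claim_equal_cannibal : Prop := ∀ (numbers : List Int) (borders : List Int), Dom_cannibal numbers borders → Pre_cannibal numbers borders → Spec_cannibal numbers borders (cannibal numbers borders)

-- ===== LEMMAS AND PROOFS =====

-- On a descending-sorted list, dropping the ≥border prefix is the same as filtering for <border.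
lemma drop_filter_ge (border : Int) :
    ∀ (s : List Int), s.Pairwise (fun a b => b ≤ a) →
      s.drop (s.filter (fun num => decide (border ≤ num))).length
        = s.filter (fun x => decide (x < border)) := by
  intro s hs
  induction s with
  | nil => simp
  | cons a s ih =>
    rcases List.pairwise_cons.mp hs with ⟨h1, h2⟩
    by_cases hb : border ≤ a
    · have hna : ¬ a < border := not_lt.mpr hb
      simp only [List.filter_cons, decide_eq_true_eq, hb, if_pos, hna]
      simp only [List.length_cons, List.drop_succ_cons, ih h2]
      simp
    · have ha : a < border := lt_of_not_ge hb
      have hnil : s.filter (fun num => decide (border ≤ num)) = [] := by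
        apply List.filter_eq_nil_iff.mpr
        intro y hy
        simp only [decide_eq_true_eq]
        exact not_le.mpr (lt_of_le_of_lt (h1 y hy) ha)
      have hself : s.filter (fun x => decide (x < border)) = s := by
        apply List.filter_eq_self.mpr
        intro y hy
        simp only [decide_eq_true_eq]
        exact lt_of_le_of_lt (h1 y hy) ha
      simp [hb, ha, hnil, hself]

-- The two filters partition the list, so B's Nat subtraction recovers the ready count.
lemma ready_length (border : Int) (s : List Int) :
    (s.filter (fun num => decide (border ≤ num))).length
      = s.length - (s.filter (fun x => decide (x < border))).length := by
  induction s with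
  | nil => simp
  | cons a s ih =>
    have hlt := List.length_filter_le (fun x => decide (x < border)) s
    by_cases hb : border ≤ a
    · have hna : ¬ a < border := not_lt.mpr hb
      simp only [List.filter_cons, decide_eq_true_eq, hb, if_pos, hna, if_neg,
        not_false_iff, List.length_cons, ih]
      omega
    · have ha : a < border := lt_of_not_ge hb
      simp only [List.filter_cons, decide_eq_true_eq, hb, if_neg, ha, if_pos,
        not_false_iff, List.length_cons, ih]
      omega

lemma foldl_needed (border : Int) :
    ∀ (l : List Int) (init : Int),
      l.foldl (fun acc c => acc + (border - c)) init
        = init + (l.length : Int) * border - l.sum := by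
  intro l
  induction l with
  | nil => simp
  | cons a l ih =>
    intro init
    simp only [List.foldl_cons, ih, List.length_cons, List.sum_cons]
    push_cast
    ring

lemma length_filter_ne (v : Int) (l : List Int) :
    (l.filter (fun x => decide (x ≠ v))).length = l.length - l.count v := by
  induction l with
  | nil => simp
  | cons a l ih =>
    have hc : l.count v ≤ l.length := List.count_le_length
    by_cases ha : a = v
    · subst ha
      have he : (List.filter (fun x => decide (x ≠ a)) (a :: l))
          = List.filter (fun x => decide (x ≠ a)) l := by simp
      rw [he, ih, List.count_cons_self, List.length_cons]
      omega
    · have he : (List.filter (fun x => decide (x ≠ v)) (a :: l))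
          = a :: List.filter (fun x => decide (x ≠ v)) l := by simp [ha]
      rw [he, List.count_cons_of_ne ha, List.length_cons, List.length_cons, ih]
      omega

-- Loop equivalence: A's rescanning loop agrees with B's incremental loop.
lemma loop_eq (border : Int) (t : List Int) :
    ∀ (fuel i : Nat), 1 ≤ i →
      ∀ (need : Int), need = (i : Int) * border - (t.take i).sum →
        cannibalLoopA border t fuel i ((i : Int) - 1)
          = cannibalLoopB border t (PySem.Dict.counter t) t.length fuel i need ((i : Int) - 1) := by
  intro fuel
  induction fuel with
  | zero => intro i hi need hneed; rfl
  | succ fuel ih =>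
    intro i hi need hneed
    simp only [cannibalLoopA, cannibalLoopB]
    by_cases hlen : i < t.length
    · have hd : ¬ (t.drop i = []) := by
        simp only [List.drop_eq_nil_iff]; omega
      rw [if_neg hd, if_pos hlen]
      have hi1 : i - 1 < t.length := by omega
      have hsm : (PySem.List.pyGet? (t.take i) (-1)).getD 0 = t[i - 1] := by
        rw [PySem.List.pyGet?_neg_one, List.getLast?_eq_getElem?]
        have hti : (t.take i).length = i := by simp; omega
        rw [hti, List.getElem?_take_of_lt (by omega), List.getElem?_eq_getElem hi1]
        rfl
      have hvB : PySem.List.pyGetD t ((i : Int) - 1) 0 = t[i - 1] := by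
        rw [PySem.List.pyGetD_eq_getElem t 0 (by omega) (by omega)]
        simp only [show ((i : Int) - 1).toNat = i - 1 from by omega]
      rw [hsm, hvB]
      have hcnt : ∀ v : Int, List.count v t
          = List.count v (t.take i) + List.count v (t.drop i) := by
        intro v
        conv_lhs => rw [← List.take_append_drop i t]
        rw [List.count_append]
      have hcnt := hcnt t[i - 1]
      have hcle : List.count t[i - 1] (t.drop i) ≤ (t.drop i).length :=
        List.count_le_length
      have hdlen : (t.drop i).length = t.length - i := by simp
      have hiff : ((removeClones t[i - 1] (t.drop i)).length
            < PySem.List.count (t.take i) t[i - 1])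
          ↔ ((t.length : Int) - (i : Int) < (PySem.Dict.counter t).getD t[i - 1] 0) := by
        rw [PySem.Dict.getD_counter]
        unfold removeClones
        rw [length_filter_ne, PySem.List.count_eq]
        constructor <;> intro h
        · omega
        · have h' : t.length - i < List.count t[i - 1] t := by
            omega
          omega
      by_cases hclone : (removeClones t[i - 1] (t.drop i)).length
          < PySem.List.count (t.take i) t[i - 1]
      · rw [if_pos hclone, if_pos (hiff.mp hclone)]
      · rw [if_neg hclone, if_neg (fun h => hclone (hiff.mpr h))]
        have hcomb : (t.take i).foldl (fun acc c => acc + (border - c)) 0 = need := by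
          rw [foldl_needed]
          have hti : (t.take i).length = i := by simp; omega
          rw [hti, hneed]
          ring
        have hvlen : ((t.drop i).length : Int) = (t.length : Int) - (i : Int) := by
          rw [hdlen]; omega
        rw [hcomb, hvlen]
        by_cases hneed2 : need ≤ (t.length : Int) - (i : Int)
        · rw [if_pos hneed2, if_pos hneed2]
          have hgi : PySem.List.pyGetD t (i : Int) 0 = t[i] := by
            rw [PySem.List.pyGetD_eq_getElem t 0 (by omega) (by omega)]
            simp
          have hti : ((t.take i).length : Int) = ((i + 1 : Nat) : Int) - 1 := by
            simp; omega
          have hii : (i : Int) = ((i + 1 : Nat) : Int) - 1 := by push_cast; ring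
          rw [hgi, hti, hii]
          apply ih (i + 1) (by omega)
          have hsum : (t.take (i + 1)).sum = (t.take i).sum + t[i] := by
            rw [List.take_add_one, List.sum_append, List.getElem?_eq_getElem hlen]
            simp
          rw [hsum, hneed]
          push_cast
          ring
        · rw [if_neg hneed2, if_neg hneed2]
    · have hd : t.drop i = [] := List.drop_eq_nil_of_le (by omega)
      rw [if_pos hd, if_neg hlen]

lemma border_body_eq (numbers : List Int) (border : Int) :
    (let p := sortAndRemoveReadyCannibals border numbers
     cannibalLoopA border p.1 p.1.length 1 0 + (p.2.length : Int))
      = (let s := PySem.List.sorted numbers (fun x => x) true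
         let t := s.filter (fun x => decide (x < border))
         cannibalLoopB border t (t.foldl (fun d x => d.insert x (d.getD x 0 + 1)) PySem.Dict.empty)
           t.length t.length 1 (match t with | [] => (0 : Int) | x :: _ => border - x) 0
           + ((s.length - t.length : Nat) : Int)) := by
  have hs : (PySem.List.sorted numbers (fun x => x) true).Pairwise (fun a b => b ≤ a) :=
    PySem.List.sorted_pairwise_rev numbers (fun x => x)
  simp only [sortAndRemoveReadyCannibals]
  rw [drop_filter_ge border _ hs, ready_length border, PySem.Dict.foldl_insert_getD_add_one_eq_counter]
  congr 1
  cases ht : (PySem.List.sorted numbers (fun x => x) true).filter (fun x => decide (x < border)) with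
  | nil => rfl
  | cons x xs =>
    have h := loop_eq border (x :: xs) (x :: xs).length 1 (le_refl 1) (border - x) (by simp)
    simpa using h

lemma foldl_borders_eq (numbers : List Int) :
    ∀ (borders acc : List Int),
      borders.foldl (fun acc border =>
        let p := sortAndRemoveReadyCannibals border numbers
        acc ++ [cannibalLoopA border p.1 p.1.length 1 0 + (p.2.length : Int)]) acc
      = borders.foldl (fun acc border =>
        let t := (PySem.List.sorted numbers (fun x => x) true).filter (fun x => decide (x < border))
        acc ++ [cannibalLoopB border t
            (t.foldl (fun d x => d.insert x (d.getD x 0 + 1)) PySem.Dict.empty)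
            t.length t.length 1 (match t with | [] => (0 : Int) | x :: _ => border - x) 0
          + (((PySem.List.sorted numbers (fun x => x) true).length - t.length : Nat) : Int)]) acc := by
  intro borders
  induction borders with
  | nil => intro acc; rfl
  | cons b bs ih =>
    intro acc
    simp only [List.foldl_cons]
    rw [ih]
    congr 2
    exact congrArg (fun z => [z]) (border_body_eq numbers b)

-- ===== VERDICT (by name: the statement is the Claim_ definition above) =====
theorem cannibal_spec : Claim_equal_cannibal := by
  intro numbers borders _ _
  show cannibal numbers borders = cannibal_alt numbers borders
  unfold cannibal cannibal_alt
  exact foldl_borders_eq numbers borders []
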